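-- pv_equiv track=rewrite | github.com/leeinae/algorithm-python | Programmers/77885.py | solution
-- ===== SOURCE A (Python) =====
-- def solution(numbers):
--     answer = []
--     for number in numbers:
--         num = list('0' + bin(number)[2:])
--         idx = int("".join(num).rfind('0'))
--         num[idx] = '1'
--
--         if number % 2 != 0:  # 짝수
--             num[idx + 1] = '0'
--         answer.append(int("0b" + "".join(num), 2))
--     return answer
-- ===== SOURCE B (Python) =====
-- def solution(numbers):
--     # Setting the rightmost zero bit of n and clearing the one just below it
--     # is pure arithmetic: low = lowest set bit of n+1, answer = n + (low + 1) // 2.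
--     return [n + (((n + 1) & -(n + 1)) + 1) // 2 for n in numbers]
-- ===== Notes on version B (the rewrite author's own statement) =====
-- stated objective: simpler
-- what changed: A builds the binary string of each number, rfinds the last '0', mutates characters and re-parses with int(,2); B replaces all string work with one arithmetic expression per number, n + (((n+1) & -(n+1)) + 1) // 2, using the lowest set bit of n+1.
-- outside the precondition, e.g. on solution([-1]): A returns [5], B returns [-1]; on solution([-2]): A raises ValueError, B returns [-1]
import Mathlib
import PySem

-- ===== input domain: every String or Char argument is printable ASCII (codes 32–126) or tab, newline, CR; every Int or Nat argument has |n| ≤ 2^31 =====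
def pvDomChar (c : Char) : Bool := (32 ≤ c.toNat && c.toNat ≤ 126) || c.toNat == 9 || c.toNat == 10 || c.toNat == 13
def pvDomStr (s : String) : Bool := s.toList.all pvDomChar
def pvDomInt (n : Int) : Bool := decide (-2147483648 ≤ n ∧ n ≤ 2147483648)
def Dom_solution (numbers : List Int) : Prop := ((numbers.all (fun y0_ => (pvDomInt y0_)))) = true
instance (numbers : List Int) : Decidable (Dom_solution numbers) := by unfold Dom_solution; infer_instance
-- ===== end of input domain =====

-- B replaces A's binary-string surgery (rfind the last '0', set two characters, re-parse) by one
-- arithmetic expression per number; objective: simpler.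

-- ===== PORT A =====

-- int("0b" + "".join(num), 2), hand-ported for the strings A builds here: "0b" followed by the
-- char list num (general int(s,2) is PySem.Int.ofCharsBase?; on "0b"+binary-digit strings the two
-- agree).  none = ValueError: empty digit run, or any char other than '0'/'1' — e.g. the 'b' that
-- survives the [2:] slice of bin() on a negative number (excluded by Pre_solution).
def parseBin0bGo (acc : Int) : List Char → Option Int
  | [] => some acc
  | c :: r =>
    if c = '0' then parseBin0bGo (2 * acc) r
    else if c = '1' then parseBin0bGo (2 * acc + 1) r
    else none

def parseBin0b? (cs : List Char) : Option Int :=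
  match cs with
  | [] => none
  | _ => parseBin0bGo 0 cs

def stepA (number : Int) : Int :=
  -- num = list('0' + bin(number)[2:])  (char-list level; (pyBin n).toList = toBinChars0b n)
  let num : List Char := '0' :: PySem.Chars.slice (PySem.Int.toBinChars0b number) (some 2) none
  -- idx = int("".join(num).rfind('0'))  (int() of an int is the identity)
  let idx : Int := PySem.Chars.rfind num ['0']
  -- num[idx] = '1'
  let num1 := PySem.List.pySetD num idx '1'
  -- if number % 2 != 0: num[idx + 1] = '0'
  let num2 := if PySem.Int.mod number 2 ≠ 0 then PySem.List.pySetD num1 (idx + 1) '0' else num1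
  -- answer.append(int("0b" + "".join(num), 2)); the .getD 0 default is unreachable under Pre_solution
  (parseBin0b? num2).getD 0

def solution (numbers : List Int) : List Int :=
  numbers.foldl (fun answer number => answer ++ [stepA number]) []

-- ===== PORT B =====

def solution_alt (numbers : List Int) : List Int :=
  numbers.map (fun n => n + PySem.Int.floordiv (PySem.Int.band (n + 1) (-(n + 1)) + 1) 2)

-- ===== PRECONDITION & SPEC =====

-- Pre_ excludes lists containing a negative number, outside the task's natural domain: bin() then
-- yields '-0b…' whose 'b' survives the [2:] slice, so A raises ValueError on every negative except
-- those of the form -(2^k-1), where the leftover 'b' is overwritten and A returns a value unrelated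
-- to the task's bit operation (see the cite in claim.json), while B returns the arithmetic result.
def Pre_solution (numbers : List Int) : Prop := ∀ n ∈ numbers, 0 ≤ n
instance (numbers : List Int) : Decidable (Pre_solution numbers) := by unfold Pre_solution; infer_instance

def pvWitness_solution : List Int := [0, 1, 5, 12, 22]

def Spec_solution (numbers : List Int) (out : List Int) : Prop := out = solution_alt numbers
instance (numbers : List Int) (out : List Int) : Decidable (Spec_solution numbers out) := by unfold Spec_solution; infer_instance

-- ===== CLAIM (what is proved, stated in full; the proofs are below) =====
def Claim_equal_solution : Prop := ∀ (numbers : List Int), Dom_solution numbers → Pre_solution numbers → Spec_solution numbers (solution numbers)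

-- ===== LEMMAS AND PROOFS =====

-- Abbreviations for the lists A builds for a nonnegative number a.
def D2 (a : Nat) : List Char := Nat.toDigits 2 a
def numA (a : Nat) : List Char := '0' :: D2 a
def idxA (a : Nat) : Int := PySem.Chars.rfind (numA a) ['0']
def n1A (a : Nat) : List Char := PySem.List.pySetD (numA a) (idxA a) '1'
def n2A (a : Nat) : List Char := if a % 2 = 1 then PySem.List.pySetD (n1A a) (idxA a + 1) '0' else n1A a
-- B's value, in Nat: LB a = lowest set bit of a+1; resN a = the common result.
def LB (a : Nat) : Nat := (a + 1) - ((a + 1) &&& a)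
def resN (a : Nat) : Nat := a + (LB a + 1) / 2

-- ---- parse lemmas ----

theorem parse?_of_ne {cs : List Char} (h : cs ≠ []) : parseBin0b? cs = parseBin0bGo 0 cs := by
  cases cs with
  | nil => exact absurd rfl h
  | cons c r => rfl

theorem go_append (s t : List Char) (acc : Int) :
    parseBin0bGo acc (s ++ t) = (parseBin0bGo acc s).bind (fun v => parseBin0bGo v t) := by
  induction s generalizing acc with
  | nil => simp [parseBin0bGo]
  | cons c r ih =>
    simp only [List.cons_append, parseBin0bGo]
    split_ifs <;> simp [ih]

theorem go_digits (a : Nat) : parseBin0bGo 0 (D2 a) = some (a : Int) := by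
  induction a using Nat.strong_induction_on with
  | _ a ih =>
    match a, ih with
    | 0, _ => decide
    | 1, _ => decide
    | (a+2), ih =>
      obtain ⟨u, hu⟩ : ∃ u, (a+2)/2 = u := ⟨_, rfl⟩
      have hval : 2 * u + (a+2) % 2 = a + 2 := by omega
      have hsplit : D2 (a+2) = D2 u ++ [Nat.digitChar ((a+2) % 2)] := by
        rw [D2, D2, Nat.toDigits_eq_if (by norm_num), if_neg (by omega), hu]
      rw [hsplit, go_append, ih u (by omega)]
      rcases Nat.mod_two_eq_zero_or_one (a+2) with h | h <;>
        · rw [h] at hval ⊢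
          simp [parseBin0bGo, Nat.digitChar]
          omega

theorem parse_numA (a : Nat) : parseBin0bGo 0 (numA a) = some (a : Int) := by
  simpa [numA, parseBin0bGo] using go_digits a

-- ---- Nat.toDigits shape lemmas ----

theorem D2_split (a : Nat) (h : 2 ≤ a) : D2 a = D2 (a / 2) ++ [Nat.digitChar (a % 2)] := by
  rw [D2, D2, Nat.toDigits_eq_if (by norm_num), if_neg (by omega)]

theorem numA_even (a : Nat) (h : a % 2 = 0) :
    ∃ t, numA a = ('0' :: t) ++ ['0'] ∧ parseBin0bGo 0 (('0' :: t) ++ ['1']) = some ((a : Int) + 1) := by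
  rcases Nat.eq_zero_or_pos a with rfl | hpos
  · exact ⟨[], by decide, by decide⟩
  · have h2 : 2 ≤ a := by omega
    refine ⟨D2 (a / 2), ?_, ?_⟩
    · have hs := D2_split a h2
      rw [h] at hs
      rw [numA, hs]
      rfl
    · rw [show (('0' :: D2 (a / 2)) : List Char) = numA (a / 2) from rfl, go_append, parse_numA]
      simp [parseBin0bGo]
      omega

theorem numA_odd (a : Nat) (h : a % 2 = 1) (h3 : 3 ≤ a) : numA a = numA (a / 2) ++ ['1'] := by
  have hs := D2_split a (by omega)
  rw [h] at hs
  rw [numA, hs]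
  rfl

theorem numA_odd_snoc (a : Nat) (h : a % 2 = 1) : ∃ ys, numA a = ys ++ ['1'] := by
  rcases Nat.lt_or_ge a 3 with hlt | hge
  · interval_cases a
    · omega
    · exact ⟨['0'], by decide⟩
    · omega
  · exact ⟨numA (a / 2), numA_odd a h hge⟩

-- ---- rfind lemmas ----

theorem rgo_zero (s : List Char) :
    PySem.Chars.rfind.go s ['0'] 0 = if ['0'].isPrefixOf s = true then 0 else -1 := by
  simp [PySem.Chars.rfind.go]

theorem rgo_succ (s : List Char) (j : Nat) :
    PySem.Chars.rfind.go s ['0'] (j + 1) =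
      if ['0'].isPrefixOf (List.drop (j + 1) s) = true then ((j : Int) + 1)
      else PySem.Chars.rfind.go s ['0'] j := by
  rw [PySem.Chars.rfind.go]
  push_cast
  rfl

theorem pfx_cons (c : Char) (r : List Char) : ['0'].isPrefixOf (c :: r) = (c == '0') := by
  simp only [List.isPrefixOf, Bool.and_true]
  rw [Bool.eq_iff_iff, beq_iff_eq, beq_iff_eq, eq_comm]

theorem rgo_congr (k : Nat) (s t : List Char)
    (h : ∀ j ≤ k, ['0'].isPrefixOf (s.drop j) = ['0'].isPrefixOf (t.drop j)) :
    PySem.Chars.rfind.go s ['0'] k = PySem.Chars.rfind.go t ['0'] k := by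
  induction k with
  | zero =>
    rw [rgo_zero, rgo_zero]
    have h0 := h 0 (by omega)
    simp only [List.drop_zero] at h0
    rw [h0]
  | succ j ih =>
    rw [rgo_succ, rgo_succ, h (j + 1) (by omega), ih (fun i hi => h i (by omega))]

theorem rgo_le (s : List Char) (k : Nat) : PySem.Chars.rfind.go s ['0'] k ≤ (k : Int) := by
  induction k with
  | zero => rw [rgo_zero]; split <;> omega
  | succ j ih => rw [rgo_succ]; split <;> [(push_cast; omega); (push_cast; omega)]

theorem rfind_lt (xs : List Char) : PySem.Chars.rfind xs ['0'] < (xs.length : Int) := by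
  rw [PySem.Chars.rfind]
  cases h : xs.length with
  | zero =>
    have : xs = [] := List.length_eq_zero_iff.mp h
    subst this
    decide
  | succ j =>
    rw [rgo_succ, if_neg]
    · have := rgo_le xs j
      push_cast
      omega
    · rw [List.drop_eq_nil_of_le (by omega)]
      decide

theorem rfind_nonneg (t : List Char) : 0 ≤ PySem.Chars.rfind ('0' :: t) ['0'] := by
  rw [PySem.Chars.rfind]
  generalize ('0' :: t).length = k
  induction k with
  | zero => rw [rgo_zero, if_pos (by rw [pfx_cons]; rfl)]
  | succ j ih => rw [rgo_succ]; split <;> [(push_cast; omega); exact ih]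

theorem rfind_append_one (xs : List Char) :
    PySem.Chars.rfind (xs ++ ['1']) ['0'] = PySem.Chars.rfind xs ['0'] := by
  rw [PySem.Chars.rfind, PySem.Chars.rfind]
  have hlen : (xs ++ ['1']).length = xs.length + 1 := by simp
  rw [hlen, rgo_succ, if_neg (by rw [List.drop_eq_nil_of_le (by simp)]; decide)]
  apply rgo_congr
  intro j hj
  rcases Nat.lt_or_ge j xs.length with hlt | hge
  · rw [List.drop_append_of_le_length (by omega)]
    cases hd : xs.drop j with
    | nil => exact absurd (congrArg List.length hd) (by simp; omega)
    | cons c r => rw [List.cons_append, pfx_cons, pfx_cons]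
  · have hj' : j = xs.length := by omega
    subst hj'
    rw [List.drop_append_of_le_length (by omega), List.drop_eq_nil_of_le (by omega)]
    decide

theorem rfind_append_zero (xs : List Char) :
    PySem.Chars.rfind (xs ++ ['0']) ['0'] = (xs.length : Int) := by
  rw [PySem.Chars.rfind]
  have hlen : (xs ++ ['0']).length = xs.length + 1 := by simp
  rw [hlen, rgo_succ, if_neg (by rw [List.drop_eq_nil_of_le (by simp)]; decide)]
  cases h : xs.length with
  | zero =>
    have : xs = [] := List.length_eq_zero_iff.mp h
    subst this
    decide
  | succ j =>
    rw [rgo_succ, if_pos]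
    · push_cast; omega
    · rw [List.drop_append_of_le_length (by omega), List.drop_eq_nil_of_le (by omega)]
      decide

-- ---- set lemmas ----

theorem pySetD_append_left {xs : List Char} (ys : List Char) {i : Int} (v : Char)
    (h0 : 0 ≤ i) (h1 : i < (xs.length : Int)) :
    PySem.List.pySetD (xs ++ ys) i v = PySem.List.pySetD xs i v ++ ys := by
  rw [PySem.List.pySetD_of_nonneg _ _ h0, PySem.List.pySetD_of_nonneg _ _ h0,
      List.set_append, if_pos (by omega)]

theorem pySetD_append_last (xs : List Char) (c v : Char) :
    PySem.List.pySetD (xs ++ [c]) ((xs.length : Int)) v = xs ++ [v] := by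
  rw [PySem.List.pySetD_of_nonneg _ _ (by positivity), List.set_append,
      if_neg (by simp)]
  simp

-- ---- lowest-set-bit (B side) lemmas ----

theorem land_succ_even (u : Nat) : (2 * u + 1) &&& (2 * u) = 2 * u := by
  have h := Nat.land_bit true u false u
  simp [Nat.bit_val] at h
  simpa using h

theorem land_succ_odd (u : Nat) : (2 * u + 2) &&& (2 * u + 1) = 2 * ((u + 1) &&& u) := by
  have h := Nat.land_bit false (u + 1) true u
  simp [Nat.bit_val] at h
  rw [show 2 * u + 2 = 2 * (u + 1) from by omega, h]

theorem LB_even (a : Nat) (h : a % 2 = 0) : LB a = 1 := by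
  obtain ⟨u, rfl⟩ : ∃ u, a = 2 * u := ⟨a / 2, by omega⟩
  rw [LB, land_succ_even]
  omega

theorem LB_odd (a : Nat) (h : a % 2 = 1) : LB a = 2 * LB (a / 2) := by
  obtain ⟨u, rfl⟩ : ∃ u, a = 2 * u + 1 := ⟨a / 2, by omega⟩
  have hdiv : (2 * u + 1) / 2 = u := by omega
  have hle : (u + 1) &&& u ≤ u + 1 := Nat.and_le_left
  rw [LB, hdiv, LB, show 2 * u + 1 + 1 = 2 * u + 2 from by omega, land_succ_odd]
  omega

theorem LB_pos (a : Nat) : 1 ≤ LB a := by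
  have : (a + 1) &&& a ≤ a := Nat.and_le_right
  rw [LB]; omega

-- ---- the common value ----

theorem main_go (a : Nat) : parseBin0bGo 0 (n2A a) = some ((resN a : Nat) : Int) := by
  induction a using Nat.strong_induction_on with
  | _ a ih =>
    rcases Nat.mod_two_eq_zero_or_one a with he | ho
    · -- a even: num ends in '0'; set that last char to '1'; no second assignment
      obtain ⟨t, hsh, hp⟩ := numA_even a he
      have hidx : idxA a = ((('0' :: t).length : Nat) : Int) := by
        rw [idxA, hsh, rfind_append_zero]
      have hn1 : n1A a = ('0' :: t) ++ ['1'] := by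
        rw [n1A, hsh, hidx, pySetD_append_last]
      have hres : resN a = a + 1 := by rw [resN, LB_even a he]
      rw [n2A, if_neg (by omega), hn1, hres, hp]
      push_cast
      ring_nf
    · -- a odd
      rcases Nat.lt_or_ge a 3 with hsm | h3
      · have : a = 1 := by omega
        subst this
        decide
      · set u := a / 2 with hu
        have hnum : numA a = numA u ++ ['1'] := numA_odd a ho h3
        have hidx : idxA a = idxA u := by rw [idxA, hnum, rfind_append_one]; rfl
        have hge : 0 ≤ idxA u := rfind_nonneg (D2 u)
        have hlt : idxA u < ((numA u).length : Int) := rfind_lt (numA u)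
        have hn1 : n1A a = n1A u ++ ['1'] := by
          rw [n1A, hnum, hidx, pySetD_append_left _ _ hge hlt]
          rfl
        have hlen1 : (n1A u).length = (numA u).length := PySem.List.length_pySetD _ _ _
        rcases Nat.mod_two_eq_zero_or_one u with hue | huo
        · -- u even: idx is the LAST index of numA u; the second assignment hits the appended '1'
          obtain ⟨t, hsh, hp⟩ := numA_even u hue
          have hidxu : idxA u = ((('0' :: t).length : Nat) : Int) := by
            rw [idxA, hsh, rfind_append_zero]
          have hn1u : n1A u = ('0' :: t) ++ ['1'] := by
            rw [n1A, hsh, hidxu, pySetD_append_last]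
          have hn2 : n2A a = (('0' :: t) ++ ['1']) ++ ['0'] := by
            rw [n2A, if_pos ho, hn1, hn1u, hidx, hidxu]
            rw [show ((('0' :: t).length : Nat) : Int) + 1 =
                (((('0' :: t) ++ ['1']).length : Nat) : Int) from by simp]
            rw [pySetD_append_last]
          have hres : resN a = a + 1 := by
            rw [resN, LB_odd a ho, ← hu, LB_even u hue]
          rw [hn2, hres, go_append, hp]
          simp [parseBin0bGo]
          omega
        · -- u odd: idx is strictly inside numA u; both assignments stay in the prefix
          obtain ⟨ys, hys⟩ := numA_odd_snoc u huo
          have hidxu_lt : idxA u < ((ys.length : Nat) : Int) := by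
            rw [idxA, hys, rfind_append_one]
            exact rfind_lt ys
          have hyslen : (numA u).length = ys.length + 1 := by rw [hys]; simp
          have hn2 : n2A a = n2A u ++ ['1'] := by
            rw [n2A, if_pos ho, hn1]
            rw [hidx, pySetD_append_left _ _ (by omega) (by rw [hlen1]; push_cast [hyslen]; omega)]
            rw [n2A, if_pos huo]
          have ihp := ih u (by omega)
          have hres : ((resN a : Nat) : Int) = 2 * ((resN u : Nat) : Int) + 1 := by
            have h1 : LB a = 2 * LB u := LB_odd a ho
            have h2 : LB u = 2 * LB (u / 2) := LB_odd u huo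
            have h3' : 1 ≤ LB (u / 2) := LB_pos (u / 2)
            have ha : a = 2 * u + 1 := by omega
            rw [resN, resN]
            push_cast
            omega
          rw [hn2, go_append, ihp, hres]
          simp [parseBin0bGo]

theorem n2A_ne (a : Nat) : n2A a ≠ [] := by
  have h1 : (n1A a).length = (numA a).length := PySem.List.length_pySetD _ _ _
  have h2 : (numA a).length = (D2 a).length + 1 := rfl
  intro hcon
  rcases Nat.mod_two_eq_zero_or_one a with he | ho
  · rw [n2A, if_neg (by omega)] at hcon
    have := congrArg List.length hcon
    simp [h1, h2] at this
  · rw [n2A, if_pos ho] at hcon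
    have := congrArg List.length hcon
    simp [PySem.List.length_pySetD, h1, h2] at this

-- ---- A's step equals the common value ----

theorem mod_two_cast (a : Nat) : PySem.Int.mod ((a : Nat) : Int) 2 = ((a % 2 : Nat) : Int) := by
  simp [PySem.Int.mod, Int.fmod_eq_emod]

theorem stepA_eq (a : Nat) : stepA ((a : Nat) : Int) = ((resN a : Nat) : Int) := by
  have hnum : ('0' :: PySem.Chars.slice (PySem.Int.toBinChars0b ((a : Nat) : Int)) (some 2) none)
      = numA a := by
    rw [PySem.Int.toBinChars0b, if_neg (by omega)]
    rw [PySem.Chars.slice, PySem.List.slice_from _ (by norm_num)]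
    simp [numA, D2]
  rw [stepA]
  simp only [hnum]
  have hmod : (PySem.Int.mod ((a : Nat) : Int) 2 ≠ 0) ↔ (a % 2 = 1) := by
    rw [mod_two_cast]
    omega
  by_cases h : a % 2 = 1
  · rw [if_pos (hmod.mpr h)]
    have hx : PySem.List.pySetD (PySem.List.pySetD (numA a) (idxA a) '1') (idxA a + 1) '0' = n2A a := by
      rw [n2A, if_pos h, n1A]
    rw [show PySem.Chars.rfind (numA a) ['0'] = idxA a from rfl, hx,
        parse?_of_ne (n2A_ne a), main_go]
    rfl
  · rw [if_neg (fun hc => h (hmod.mp hc))]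
    have hx : PySem.List.pySetD (numA a) (idxA a) '1' = n2A a := by
      rw [n2A, if_neg (by omega), n1A]
    rw [show PySem.Chars.rfind (numA a) ['0'] = idxA a from rfl, hx,
        parse?_of_ne (n2A_ne a), main_go]
    rfl

-- ---- B's step equals the common value ----

theorem band_cast (a : Nat) :
    PySem.Int.band (((a : Nat) : Int) + 1) (-(((a : Nat) : Int) + 1)) = ((LB a : Nat) : Int) := by
  have h3 : ¬ (((a : Nat) : Int) ≤ -1) := by omega
  rw [PySem.Int.band]
  simp [h3, LB]
  exact fun h => absurd h (by omega)

theorem floordiv_two_cast (m : Nat) :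
    PySem.Int.floordiv ((m : Nat) : Int) 2 = ((m / 2 : Nat) : Int) := by
  rw [PySem.Int.floordiv, show (2 : Int) = ((2 : Nat) : Int) from rfl, ← Int.ofNat_fdiv]

theorem stepB_eq (a : Nat) :
    ((a : Nat) : Int) + PySem.Int.floordiv (PySem.Int.band (((a : Nat) : Int) + 1) (-(((a : Nat) : Int) + 1)) + 1) 2
      = ((resN a : Nat) : Int) := by
  rw [band_cast, show ((LB a : Nat) : Int) + 1 = (((LB a + 1 : Nat)) : Int) from by push_cast; ring,
      floordiv_two_cast, resN]
  push_cast
  ring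

theorem step_agree (n : Int) (h : 0 ≤ n) :
    stepA n = n + PySem.Int.floordiv (PySem.Int.band (n + 1) (-(n + 1)) + 1) 2 := by
  obtain ⟨a, rfl⟩ : ∃ a : Nat, n = ((a : Nat) : Int) := ⟨n.toNat, (Int.toNat_of_nonneg h).symm⟩
  rw [stepA_eq, ← stepB_eq]

theorem solution_foldl (l acc : List Int) (h : ∀ n ∈ l, 0 ≤ n) :
    l.foldl (fun answer number => answer ++ [stepA number]) acc =
      acc ++ l.map (fun n => n + PySem.Int.floordiv (PySem.Int.band (n + 1) (-(n + 1)) + 1) 2) := by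
  induction l generalizing acc with
  | nil => simp
  | cons x r ih =>
    simp only [List.foldl_cons, List.map_cons]
    rw [ih _ (fun n hn => h n (List.mem_cons_of_mem _ hn)),
        step_agree x (h x (List.mem_cons_self))]
    simp

-- ===== VERDICT (by name: the statement is the Claim_ definition above) =====
theorem solution_spec : Claim_equal_solution := by
  intro numbers _ hpre
  unfold Spec_solution solution solution_alt
  rw [solution_foldl numbers [] hpre]
  simp
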